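-- pv_equiv track=rewrite | github.com/nathanrockell5/calculating-distance-between-quadkeys | source_code/main.py | find_distance_vertical
-- ===== SOURCE A (Python) =====
-- def find_distance_vertical(qk1, qk2):
--     # Used to handle different length quadkeys.
--     min_len = min(len(str(qk1)), len(str(qk2)))
--
--     # Truncate either quadkey if required and reverse it.
--     qk1 = str(qk1)[:min_len][::-1]
--     qk2 = str(qk2)[:min_len][::-1]
--
--     # Initalise distance variable
--     distance = 0
--
--     for i in range(len(qk1)):
--         if (int(qk1[i]) <= 1) and (int(qk2[i]) > 1):
--             distance += pow(2, i)
--         elif (int(qk1[i]) > 1) and (int(qk2[i]) <= 1):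
--             distance -= pow(2, i)
--
--     return abs(distance)
-- ===== SOURCE B (Python) =====
-- def find_distance_vertical(qk1, qk2):
--     s1, s2 = str(qk1), str(qk2)
--     min_len = min(len(s1), len(s2))
--
--     def value(s):
--         # Interpret the truncated quadkey as a binary number, MSB first:
--         # bit i is 1 iff the digit is 2 or 3 (the "south" tiles).
--         v = 0
--         for d in s[:min_len]:
--             v = v * 2 + (1 if int(d) > 1 else 0)
--         return v
--
--     return abs(value(s1) - value(s2))
-- ===== Notes on version B (the rewrite author's own statement) =====
-- stated objective: alternative
-- what changed: Instead of reversing both truncated quadkeys and accumulating signed +/-2^i contributions per differing position, B interprets each truncated quadkey directly as a binary number (Horner, MSB first, bit = digit>1) and returns abs(v1 - v2).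
import Mathlib
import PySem

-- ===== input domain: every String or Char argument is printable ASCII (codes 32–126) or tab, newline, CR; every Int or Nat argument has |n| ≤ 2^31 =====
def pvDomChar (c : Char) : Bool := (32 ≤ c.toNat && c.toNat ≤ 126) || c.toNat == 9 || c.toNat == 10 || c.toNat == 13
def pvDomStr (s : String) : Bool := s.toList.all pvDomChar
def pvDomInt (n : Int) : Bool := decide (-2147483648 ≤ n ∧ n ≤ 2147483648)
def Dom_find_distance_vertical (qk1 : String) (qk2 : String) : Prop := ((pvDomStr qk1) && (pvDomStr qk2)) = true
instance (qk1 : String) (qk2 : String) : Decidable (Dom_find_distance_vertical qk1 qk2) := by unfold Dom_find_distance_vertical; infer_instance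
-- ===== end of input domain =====

-- B replaces A's reverse-and-accumulate-signed-powers loop by reading each truncated
-- quadkey as a binary number (Horner, MSB first) and returning |v1 - v2| (objective: alternative).

-- int(c) for a one-character string c; Pre_ guarantees c is a digit, so the
-- default 0 (Python: ValueError) is never reached inside the claim.
def pvInt (c : Char) : Int := (PySem.Int.ofChars? [c]).getD 0

-- ===== PORT A =====
def find_distance_vertical (qk1 : String) (qk2 : String) : Int :=
  -- min_len = min(len(qk1), len(qk2))
  let min_len := min qk1.toList.length qk2.toList.length
  -- qk1 = qk1[:min_len][::-1]  ([::-1] is reverse, cf. PySem.List.slice?_none_none_neg_one)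
  let r1 := (PySem.List.slice qk1.toList none (some (min_len : Int))).reverse
  let r2 := (PySem.List.slice qk2.toList none (some (min_len : Int))).reverse
  -- for i in range(len(qk1)): …  (indices are in range, so the getD defaults are never reached)
  let distance := (List.range r1.length).foldl (fun (d : Int) (i : Nat) =>
    if pvInt ((PySem.List.pyGet? r1 (i : Int)).getD '0') ≤ 1 ∧
       pvInt ((PySem.List.pyGet? r2 (i : Int)).getD '0') > 1 then d + (2:Int) ^ i
    else if pvInt ((PySem.List.pyGet? r1 (i : Int)).getD '0') > 1 ∧
            pvInt ((PySem.List.pyGet? r2 (i : Int)).getD '0') ≤ 1 then d - (2:Int) ^ i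
    else d) 0
  |distance|

-- ===== PORT B =====
def find_distance_vertical_alt (qk1 : String) (qk2 : String) : Int :=
  let min_len := min qk1.toList.length qk2.toList.length
  -- value(s): v = v*2 + (1 if int(d) > 1 else 0) over s[:min_len]
  let value := fun (s : List Char) =>
    (PySem.List.slice s none (some (min_len : Int))).foldl
      (fun v d => v * 2 + (if pvInt d > 1 then 1 else 0)) 0
  |value qk1.toList - value qk2.toList|

-- ===== PRECONDITION & SPEC =====
-- Pre_ excludes exactly the inputs where Python's int() raises ValueError in both A and B:
-- a non-digit character among the first min_len characters of either quadkey.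
def Pre_find_distance_vertical (qk1 : String) (qk2 : String) : Prop :=
  ((qk1.toList.take (min qk1.toList.length qk2.toList.length)).all Char.isDigit = true) ∧
  ((qk2.toList.take (min qk1.toList.length qk2.toList.length)).all Char.isDigit = true)
instance (qk1 : String) (qk2 : String) : Decidable (Pre_find_distance_vertical qk1 qk2) := by
  unfold Pre_find_distance_vertical; infer_instance

def pvWitness_find_distance_vertical : String × String := ("0123", "31")

def Spec_find_distance_vertical (qk1 : String) (qk2 : String) (out : Int) : Prop := out = find_distance_vertical_alt qk1 qk2
instance (qk1 : String) (qk2 : String) (out : Int) : Decidable (Spec_find_distance_vertical qk1 qk2 out) := by unfold Spec_find_distance_vertical; infer_instance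

-- ===== CLAIM (what is proved, stated in full; the proofs are below) =====
def Claim_equal_find_distance_vertical : Prop := ∀ (qk1 : String) (qk2 : String), Dom_find_distance_vertical qk1 qk2 → Pre_find_distance_vertical qk1 qk2 → Spec_find_distance_vertical qk1 qk2 (find_distance_vertical qk1 qk2)

-- ===== LEMMAS AND PROOFS =====

-- the bit a digit contributes: 1 iff int(d) > 1
def pvBit (c : Char) : Int := if pvInt c > 1 then 1 else 0

-- little-endian value of a list of digit characters
def pvG (r : List Char) : Int :=
  ∑ i ∈ Finset.range r.length, pvBit ((PySem.List.pyGet? r (i : Int)).getD '0') * (2:Int) ^ i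

theorem pvG_append_singleton (r : List Char) (c : Char) :
    pvG (r ++ [c]) = pvG r + pvBit c * (2:Int) ^ r.length := by
  unfold pvG
  rw [List.length_append, List.length_singleton, Finset.sum_range_succ]
  congr 1
  · apply Finset.sum_congr rfl
    intro i hi
    have hi' : i < r.length := Finset.mem_range.mp hi
    simp [PySem.List.pyGet?_natCast, List.getElem?_append_left hi']
  · simp

theorem pvHorner (p : List Char) (acc : Int) :
    p.foldl (fun v d => v * 2 + (if pvInt d > 1 then 1 else 0)) acc
      = acc * (2:Int) ^ p.length + pvG p.reverse := by
  induction p generalizing acc with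
  | nil => simp [pvG]
  | cons c t ih =>
    simp only [List.foldl_cons, List.reverse_cons, ih, pvG_append_singleton,
      List.length_reverse, List.length_cons]
    show _ = acc * (2:Int) ^ (t.length + 1) + (pvG t.reverse + pvBit c * (2:Int) ^ t.length)
    unfold pvBit
    ring

theorem pvLoop_sum (f : Nat → Int) (n : Nat) (c : Int) :
    (List.range n).foldl (fun d i => d + f i) c = c + ∑ i ∈ Finset.range n, f i := by
  induction n generalizing c with
  | zero => simp
  | succ n ih => rw [List.range_succ, List.foldl_append, ih, Finset.sum_range_succ]; simp; ring

theorem pvStep (a b d w : Int) :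
    (if a ≤ 1 ∧ b > 1 then d + w else if a > 1 ∧ b ≤ 1 then d - w else d)
      = d + ((if b > 1 then (1 : Int) else 0) - (if a > 1 then (1 : Int) else 0)) * w := by
  split_ifs <;> (try (exfalso; omega)) <;> ring

theorem pvLoopA (r1 r2 : List Char) :
    (List.range r1.length).foldl (fun (d : Int) (i : Nat) =>
      if pvInt ((PySem.List.pyGet? r1 (i : Int)).getD '0') ≤ 1 ∧
         pvInt ((PySem.List.pyGet? r2 (i : Int)).getD '0') > 1 then d + (2:Int) ^ i
      else if pvInt ((PySem.List.pyGet? r1 (i : Int)).getD '0') > 1 ∧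
              pvInt ((PySem.List.pyGet? r2 (i : Int)).getD '0') ≤ 1 then d - (2:Int) ^ i
      else d) 0
    = ∑ i ∈ Finset.range r1.length,
        (pvBit ((PySem.List.pyGet? r2 (i : Int)).getD '0')
          - pvBit ((PySem.List.pyGet? r1 (i : Int)).getD '0')) * (2:Int) ^ i := by
  have hfun : (fun (d : Int) (i : Nat) =>
      if pvInt ((PySem.List.pyGet? r1 (i : Int)).getD '0') ≤ 1 ∧
         pvInt ((PySem.List.pyGet? r2 (i : Int)).getD '0') > 1 then d + (2:Int) ^ i
      else if pvInt ((PySem.List.pyGet? r1 (i : Int)).getD '0') > 1 ∧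
              pvInt ((PySem.List.pyGet? r2 (i : Int)).getD '0') ≤ 1 then d - (2:Int) ^ i
      else d)
    = fun (d : Int) (i : Nat) => d + (pvBit ((PySem.List.pyGet? r2 (i : Int)).getD '0')
          - pvBit ((PySem.List.pyGet? r1 (i : Int)).getD '0')) * (2:Int) ^ i := by
    funext d i
    rw [pvStep]
    rfl
  rw [hfun, pvLoop_sum]
  simp

-- ===== VERDICT (by name: the statement is the Claim_ definition above) =====
theorem find_distance_vertical_spec : Claim_equal_find_distance_vertical := by
  unfold Claim_equal_find_distance_vertical Spec_find_distance_vertical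
  intro qk1 qk2 _ _
  unfold find_distance_vertical find_distance_vertical_alt
  simp only [PySem.List.slice_to_natCast]
  set m := min qk1.toList.length qk2.toList.length with hm
  set p1 := qk1.toList.take m with hp1
  set p2 := qk2.toList.take m with hp2
  have hlen1 : p1.length = m := by
    rw [hp1, List.length_take]; omega
  have hlen2 : p2.length = m := by
    rw [hp2, List.length_take]; omega
  have hlenr : p1.reverse.length = p2.reverse.length := by
    simp [hlen1, hlen2]
  rw [pvLoopA, pvHorner, pvHorner]
  simp only [zero_mul, zero_add, sub_mul]
  rw [Finset.sum_sub_distrib]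
  have h1 : ∑ i ∈ Finset.range p1.reverse.length,
      pvBit ((PySem.List.pyGet? p1.reverse (i : Int)).getD '0') * (2:Int) ^ i = pvG p1.reverse := by
    rfl
  have h2 : ∑ i ∈ Finset.range p1.reverse.length,
      pvBit ((PySem.List.pyGet? p2.reverse (i : Int)).getD '0') * (2:Int) ^ i = pvG p2.reverse := by
    unfold pvG; rw [hlenr]
  rw [h1, h2, abs_sub_comm]
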